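-- pv_equiv track=rewrite | github.com/mingkwang/- | product_test.py | indent_process
-- ===== SOURCE A (Python) =====
-- def indent_process(src_str: str, n: int = 0):
--     dst_str = ''
--     last_index = 0
--     src_str = src_str.replace(', ', ',')
--     for index in range(len(src_str)):
--         if src_str[index] == '{':
--             if len(src_str[last_index: index]):
--                 dst_str += ('\n' + ('    ' * n) + src_str[last_index: index])
--             dst_str += ('\n' + ('    ' * n) + '{')
--             n += 1
--             last_index = index + 1
--         elif src_str[index] == '}':
--             if len(src_str[last_index: index]):
--                 dst_str += ('\n' + ('    ' * n) + src_str[last_index: index])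
--             n -= 1
--             dst_str += ('\n' + ('    ' * n) + '}')
--             last_index = index + 1
--         elif src_str[index] == ',':
--             if len(src_str[last_index: index + 1]):
--                 dst_str += ('\n' + ('    ' * n) + src_str[last_index: index + 1])
--             last_index = index + 1
--
--     return dst_str
-- ===== SOURCE B (Python) =====
-- def indent_process(src_str: str, n: int = 0):
--     s = src_str.replace(', ', ',')
--     # Pass 1: tokenize into interleaved text segments and single delimiters
--     # (always starts and ends with a text segment, possibly empty).
--     tokens = []
--     cur = ''
--     for ch in s:
--         if ch in '{},':
--             tokens.append(cur)
--             tokens.append(ch)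
--             cur = ''
--         else:
--             cur += ch
--     tokens.append(cur)
--     # Pass 2: walk the tokens with a pending text segment and an indent depth.
--     out = ''
--     pending = ''
--     for tok in tokens:
--         if tok == '{':
--             if pending:
--                 out += '\n' + '    ' * n + pending
--             out += '\n' + '    ' * n + '{'
--             n += 1
--             pending = ''
--         elif tok == '}':
--             if pending:
--                 out += '\n' + '    ' * n + pending
--             n -= 1
--             out += '\n' + '    ' * n + '}'
--             pending = ''
--         elif tok == ',':
--             out += '\n' + '    ' * n + pending + ','
--             pending = ''
--         else:
--             pending = tok
--     # a trailing text segment after the last delimiter is (deliberately) not emitted,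
--     # matching the original's behaviour
--     return out
-- ===== Notes on version B (the rewrite author's own statement) =====
-- stated objective: alternative
-- what changed: B tokenizes the string once into interleaved text segments and single delimiters ({,},,) and then folds over the token list with a pending segment, instead of A's index loop that re-slices src_str[last_index:index] at every delimiter.
import Mathlib
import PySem

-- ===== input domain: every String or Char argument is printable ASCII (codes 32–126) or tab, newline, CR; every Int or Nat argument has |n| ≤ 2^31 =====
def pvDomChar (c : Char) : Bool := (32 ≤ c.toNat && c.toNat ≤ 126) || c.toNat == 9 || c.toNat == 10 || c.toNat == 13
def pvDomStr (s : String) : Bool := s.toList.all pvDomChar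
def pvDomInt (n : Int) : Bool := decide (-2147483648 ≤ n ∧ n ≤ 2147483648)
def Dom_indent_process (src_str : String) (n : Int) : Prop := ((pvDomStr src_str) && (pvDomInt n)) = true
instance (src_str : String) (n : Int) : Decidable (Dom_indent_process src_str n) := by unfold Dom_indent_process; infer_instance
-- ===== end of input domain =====

-- B replaces A's index loop with re-slicing by a tokenize-then-fold pass over
-- interleaved text segments and single delimiters (objective: alternative).

-- '\n' + '    ' * m  as Python computes it (str * int is empty for m ≤ 0)
def pvNL (m : Int) : List Char := '\n' :: (List.replicate m.toNat [' ', ' ', ' ', ' ']).flatten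

-- ===== PORT A =====
-- one index-loop step of A; state = (dst_str, last_index, n); slices s[a:b] with
-- 0 ≤ a ≤ b are exactly (s.drop a).take (b - a) (PySem.List.slice_natCast)
def stepA (s : List Char) (st : List Char × Nat × Int) (index : Nat) : List Char × Nat × Int :=
  let dst := st.1; let last := st.2.1; let m := st.2.2
  if s.getD index ' ' = '{' then
    let dst := if ((s.drop last).take (index - last)).length ≠ 0 then
        dst ++ pvNL m ++ (s.drop last).take (index - last) else dst
    (dst ++ pvNL m ++ ['{'], index + 1, m + 1)
  else if s.getD index ' ' = '}' then
    let dst := if ((s.drop last).take (index - last)).length ≠ 0 then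
        dst ++ pvNL m ++ (s.drop last).take (index - last) else dst
    (dst ++ pvNL (m - 1) ++ ['}'], index + 1, m - 1)
  else if s.getD index ' ' = ',' then
    let dst := if ((s.drop last).take (index + 1 - last)).length ≠ 0 then
        dst ++ pvNL m ++ (s.drop last).take (index + 1 - last) else dst
    (dst, index + 1, m)
  else (dst, last, m)

def indent_process (src_str : String) (n : Int) : String :=
  let s := (PySem.Str.replace src_str ", " ",").toList
  -- for index in range(len(src_str)): range(len) is exactly List.range s.length
  let r := (List.range s.length).foldl (stepA s) ([], 0, n)
  String.ofList r.1

-- ===== PORT B =====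
-- pass 1 of B: split into text segments and single delimiters
def stepTok (st : List (List Char) × List Char) (ch : Char) : List (List Char) × List Char :=
  if ch = '{' ∨ ch = '}' ∨ ch = ',' then (st.1 ++ [st.2, [ch]], [])
  else (st.1, st.2 ++ [ch])

-- pass 2 of B: one token; state = (out, pending, n)
def stepB (st : List Char × List Char × Int) (tok : List Char) : List Char × List Char × Int :=
  let out := st.1; let pending := st.2.1; let m := st.2.2
  if tok = ['{'] then
    ((if pending ≠ [] then out ++ pvNL m ++ pending else out) ++ pvNL m ++ ['{'], [], m + 1)
  else if tok = ['}'] then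
    ((if pending ≠ [] then out ++ pvNL m ++ pending else out) ++ pvNL (m - 1) ++ ['}'], [], m - 1)
  else if tok = [','] then
    (out ++ pvNL m ++ pending ++ [','], [], m)
  else (out, tok, m)

def indent_process_alt (src_str : String) (n : Int) : String :=
  let s := (PySem.Str.replace src_str ", " ",").toList
  let t := s.foldl stepTok ([], [])
  let tokens := t.1 ++ [t.2]
  let r := tokens.foldl stepB ([], [], n)
  String.ofList r.1

-- ===== PRECONDITION & SPEC =====
def Spec_indent_process (src_str : String) (n : Int) (out : String) : Prop := out = indent_process_alt src_str n
instance (src_str : String) (n : Int) (out : String) : Decidable (Spec_indent_process src_str n out) := by unfold Spec_indent_process; infer_instance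

-- ===== CLAIM (what is proved, stated in full; the proofs are below) =====
def Claim_equal_indent_process : Prop := ∀ (src_str : String) (n : Int), Dom_indent_process src_str n → Spec_indent_process src_str n (indent_process src_str n)

-- ===== LEMMAS AND PROOFS =====

-- common recursive description of both passes: rest of the string, pending segment, depth
def core : List Char → List Char → Int → List Char
  | [], _, _ => []
  | c :: rest, pend, m =>
    if c = '{' then
      (if pend ≠ [] then pvNL m ++ pend else []) ++ pvNL m ++ ['{'] ++ core rest [] (m + 1)
    else if c = '}' then
      (if pend ≠ [] then pvNL m ++ pend else []) ++ pvNL (m - 1) ++ ['}'] ++ core rest [] (m - 1)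
    else if c = ',' then
      pvNL m ++ pend ++ [','] ++ core rest [] m
    else core rest (pend ++ [c]) m

theorem stepA_core : ∀ (rest done pend dst : List Char) (m : Int),
    ((List.range' (done.length + pend.length) rest.length).foldl
      (stepA (done ++ pend ++ rest)) (dst, done.length, m)).1 = dst ++ core rest pend m := by
  intro rest
  induction rest with
  | nil => intro done pend dst m; simp [core]
  | cons c r ih =>
    intro done pend dst m
    have hget : (done ++ pend ++ c :: r).getD (done.length + pend.length) ' ' = c := by
      rw [List.getD, List.getElem?_append_right (by simp)]
      simp
    have hdrop : (done ++ pend ++ c :: r).drop done.length = pend ++ c :: r := by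
      rw [List.drop_append_of_le_length (by simp)]
      simp
    have htake1 : (pend ++ c :: r).take (done.length + pend.length - done.length) = pend := by
      rw [show done.length + pend.length - done.length = pend.length by omega]
      simp
    have htake2 : (pend ++ c :: r).take (done.length + pend.length + 1 - done.length) = pend ++ [c] := by
      rw [show done.length + pend.length + 1 - done.length = pend.length + 1 by omega]
      simp [List.take_append]
    rw [List.length_cons, List.range'_succ, List.foldl_cons]
    by_cases h1 : c = '{'
    · subst h1
      have e1 : stepA (done ++ pend ++ '{' :: r) (dst, done.length, m) (done.length + pend.length)
          = ((if pend.length ≠ 0 then dst ++ pvNL m ++ pend else dst) ++ pvNL m ++ ['{'],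
             done.length + pend.length + 1, m + 1) := by
        simp [stepA]
      rw [e1]
      have hIH := ih (done ++ pend ++ ['{']) []
        ((if pend.length ≠ 0 then dst ++ pvNL m ++ pend else dst) ++ pvNL m ++ ['{']) (m + 1)
      simp only [List.length_append, List.length_cons, List.length_nil, List.append_nil,
        Nat.add_zero, Nat.zero_add, List.append_assoc, List.cons_append, List.nil_append] at hIH ⊢
      rw [show done.length + pend.length + 1 = done.length + (pend.length + 1) from by omega, hIH]
      simp only [core]
      rcases Decidable.em (pend = []) with hp | hp
      · subst hp; simp
      · simp [hp, List.length_eq_zero_iff]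
    · by_cases h2 : c = '}'
      · subst h2
        have e1 : stepA (done ++ pend ++ '}' :: r) (dst, done.length, m) (done.length + pend.length)
            = ((if pend.length ≠ 0 then dst ++ pvNL m ++ pend else dst) ++ pvNL (m - 1) ++ ['}'],
               done.length + pend.length + 1, m - 1) := by
          simp [stepA]
        rw [e1]
        have hIH := ih (done ++ pend ++ ['}']) []
          ((if pend.length ≠ 0 then dst ++ pvNL m ++ pend else dst) ++ pvNL (m - 1) ++ ['}']) (m - 1)
        simp only [List.length_append, List.length_cons, List.length_nil, List.append_nil,
          Nat.add_zero, Nat.zero_add, List.append_assoc, List.cons_append, List.nil_append] at hIH ⊢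
        rw [show done.length + pend.length + 1 = done.length + (pend.length + 1) from by omega, hIH]
        simp only [core]
        rcases Decidable.em (pend = []) with hp | hp
        · subst hp; simp
        · simp [hp, List.length_eq_zero_iff]
      · by_cases h3 : c = ','
        · subst h3
          have e1 : stepA (done ++ pend ++ ',' :: r) (dst, done.length, m) (done.length + pend.length)
              = (dst ++ pvNL m ++ (pend ++ [',']), done.length + pend.length + 1, m) := by
            simp [stepA, htake2]
          rw [e1]
          have hIH := ih (done ++ pend ++ [',']) []
            (dst ++ pvNL m ++ (pend ++ [','])) m
          simp only [List.length_append, List.length_cons, List.length_nil, List.append_nil,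
            Nat.add_zero, Nat.zero_add, List.append_assoc, List.cons_append, List.nil_append] at hIH ⊢
          rw [show done.length + pend.length + 1 = done.length + (pend.length + 1) from by omega, hIH]
          simp [core]
        · have e1 : stepA (done ++ pend ++ c :: r) (dst, done.length, m) (done.length + pend.length)
              = (dst, done.length, m) := by
            simp [stepA, h1, h2, h3]
          rw [e1]
          have hIH := ih done (pend ++ [c]) dst m
          simp only [List.length_append, List.length_cons, List.length_nil,
            Nat.zero_add, List.append_assoc, List.cons_append, List.nil_append] at hIH ⊢
          rw [show done.length + pend.length + 1 = done.length + (pend.length + 1) from by omega, hIH]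
          simp [core, h1, h2, h3]

theorem tok_prefix : ∀ (cs : List Char) (toks : List (List Char)) (cur : List Char),
    cs.foldl stepTok (toks, cur) =
      (toks ++ (cs.foldl stepTok ([], cur)).1, (cs.foldl stepTok ([], cur)).2) := by
  intro cs
  induction cs with
  | nil => intro toks cur; simp
  | cons c r ih =>
    intro toks cur
    by_cases h : c = '{' ∨ c = '}' ∨ c = ','
    · simp only [List.foldl_cons, stepTok, if_pos h, List.nil_append]
      rw [ih (toks ++ [cur, [c]]) [], ih [cur, [c]] []]
      simp
    · simp only [List.foldl_cons, stepTok, if_neg h]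
      exact ih toks (cur ++ [c])


theorem stepB_core : ∀ (cs cur out p : List Char) (m : Int),
    cur.all (fun c => ¬(c = '{' ∨ c = '}' ∨ c = ',')) →
    (((cs.foldl stepTok ([], cur)).1 ++ [(cs.foldl stepTok ([], cur)).2]).foldl stepB (out, p, m)).1
      = out ++ core cs cur m := by
  intro cs
  induction cs with
  | nil =>
    intro cur out p m hcur
    have h1 : cur ≠ ['{'] := by rintro rfl; simp at hcur
    have h2 : cur ≠ ['}'] := by rintro rfl; simp at hcur
    have h3 : cur ≠ [','] := by rintro rfl; simp at hcur
    simp [core, stepB, h1, h2, h3]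
  | cons c r ih =>
    intro cur out p m hcur
    have h1 : cur ≠ ['{'] := by rintro rfl; simp at hcur
    have h2 : cur ≠ ['}'] := by rintro rfl; simp at hcur
    have h3 : cur ≠ [','] := by rintro rfl; simp at hcur
    by_cases h : c = '{' ∨ c = '}' ∨ c = ','
    · have hsplit : (c :: r).foldl stepTok ([], cur)
          = ([cur, [c]] ++ (r.foldl stepTok ([], [])).1, (r.foldl stepTok ([], [])).2) := by
        simp only [List.foldl_cons, stepTok, if_pos h, List.nil_append]
        exact tok_prefix r [cur, [c]] []
      rw [hsplit]
      simp only [List.cons_append, List.nil_append, List.foldl_cons]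
      have hcurtext : stepB (out, p, m) cur = (out, cur, m) := by
        simp [stepB, h1, h2, h3]
      rw [hcurtext]
      rcases h with rfl | rfl | rfl
      · have : stepB (out, cur, m) ['{']
            = ((if cur ≠ [] then out ++ pvNL m ++ cur else out) ++ pvNL m ++ ['{'], [], m + 1) := by
          simp [stepB]
        rw [this, ih [] _ [] (m + 1) (by simp)]
        simp [core]; split_ifs <;> simp
      · have : stepB (out, cur, m) ['}']
            = ((if cur ≠ [] then out ++ pvNL m ++ cur else out) ++ pvNL (m - 1) ++ ['}'], [], m - 1) := by
          simp [stepB]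
        rw [this, ih [] _ [] (m - 1) (by simp)]
        simp [core]; split_ifs <;> simp
      · have : stepB (out, cur, m) [','] = (out ++ pvNL m ++ cur ++ [','], [], m) := by
          simp [stepB]
        rw [this, ih [] _ [] m (by simp)]
        simp [core]
    · have : (c :: r).foldl stepTok ([], cur) = r.foldl stepTok ([], cur ++ [c]) := by
        simp only [List.foldl_cons, stepTok, if_neg h]
      rw [this, ih (cur ++ [c]) out p m (by simp_all), core]
      simp_all

-- ===== VERDICT (by name: the statement is the Claim_ definition above) =====
theorem indent_process_spec : Claim_equal_indent_process := by
  intro src_str n _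
  unfold Spec_indent_process indent_process indent_process_alt
  have hA := stepA_core ((PySem.Str.replace src_str ", " ",").toList) [] [] [] n
  have hB := stepB_core ((PySem.Str.replace src_str ", " ",").toList) [] [] [] n (by simp)
  simp only [List.nil_append, List.length_nil, Nat.zero_add] at hA hB
  simp only [List.range_eq_range']
  rw [hA, hB]
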